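-- pv_equiv track=rewrite | github.com/cauanicastro/Prog1Ifes | biblioteca.py | separaPalavraDicionario
-- ===== SOURCE A (Python) =====
-- def separaPalavraDicionario(linha, dicionario):
--     aux = ""
--     separadores = ['-']
--     for letra in linha:
--         if letra.isalpha() or (aux and letra in separadores):
--             aux += letra
--         else:
--             if aux and len(aux) > 2:
--                 dicionario[aux] = aux in dicionario and dicionario[aux] + 1 or 1
--             aux = ""
--     if aux and len(aux) > 2:
--         dicionario[aux] = aux in dicionario and dicionario[aux] + 1 or 1
--     return dicionario
-- ===== SOURCE B (Python) =====
-- import re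
--
-- def separaPalavraDicionario(linha, dicionario):
--     # Extract the word tokens up front (a letter, then letters or hyphens),
--     # then count those longer than 2 letters with the same and/or idiom.
--     for palavra in re.findall(r'[^\W\d_](?:[^\W\d_]|-)*', linha):
--         if len(palavra) > 2:
--             dicionario[palavra] = palavra in dicionario and dicionario[palavra] + 1 or 1
--     return dicionario
-- ===== Notes on version B (the rewrite author's own statement) =====
-- stated objective: idiomatic
-- what changed: Replaces A's per-character aux/separadores state machine with a regex findall that extracts the word tokens (letter, then letters or hyphens) up front, followed by a counting pass over the tokens.
import Mathlib
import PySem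

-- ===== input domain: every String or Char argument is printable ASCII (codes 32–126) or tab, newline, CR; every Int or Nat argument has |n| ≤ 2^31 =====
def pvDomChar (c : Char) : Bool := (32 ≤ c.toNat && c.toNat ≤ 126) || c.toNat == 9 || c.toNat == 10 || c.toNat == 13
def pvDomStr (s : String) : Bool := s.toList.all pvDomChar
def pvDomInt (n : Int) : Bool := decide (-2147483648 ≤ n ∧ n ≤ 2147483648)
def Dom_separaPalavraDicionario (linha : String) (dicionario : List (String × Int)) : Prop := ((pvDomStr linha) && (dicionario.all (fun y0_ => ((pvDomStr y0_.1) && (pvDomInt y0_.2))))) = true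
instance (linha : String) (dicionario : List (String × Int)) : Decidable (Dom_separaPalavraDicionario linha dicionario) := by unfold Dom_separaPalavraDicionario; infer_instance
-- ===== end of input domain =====

-- B extracts the word tokens up front (regex findall: letter, then letters or hyphens)
-- and counts them in a second pass, replacing A's per-character state machine; objective: idiomatic.
-- Both programs mutate `dicionario` in place and return it; the equivalence proved is about the return value.


-- ===== PORT A =====
-- the and/or counting idiom `d[aux] = aux in d and d[aux] + 1 or 1` (0 is falsy)
def pvBump (d : PySem.Dict String Int) (k : String) : Int :=
  match d.get? k with
  | some v => if v + 1 ≠ 0 then v + 1 else 1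
  | none => 1

-- `if aux and len(aux) > 2: dicionario[aux] = …` (A's flush, in the loop body and after it)
def pvFlushA (aux : List Char) (d : PySem.Dict String Int) : PySem.Dict String Int :=
  if aux ≠ [] ∧ aux.length > 2 then d.insert (String.ofList aux) (pvBump d (String.ofList aux)) else d

-- one iteration of A's `for letra in linha` loop; state = (aux, dicionario)
def pvStepA (s : (List Char) × PySem.Dict String Int) (c : Char) :
    (List Char) × PySem.Dict String Int :=
  if PySem.Chars.isalpha c || (decide (s.1 ≠ []) && decide (c ∈ ['-'])) then (s.1 ++ [c], s.2)
  else ([], pvFlushA s.1 s.2)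

def separaPalavraDicionario (linha : String) (dicionario : List (String × Int)) : List (String × Int) :=
  let r := linha.toList.foldl pvStepA ([], PySem.Dict.mk dicionario)
  (pvFlushA r.1 r.2).items

-- ===== PORT B =====
-- hand port of re.findall(r'[^\W\d_](?:[^\W\d_]|-)*', linha): exact on the ASCII domain,
-- where the regex letter class coincides with isalpha
def pvCont (c : Char) : Bool := PySem.Chars.isalpha c || c == '-'

def pvTokens : List Char → List (List Char)
  | [] => []
  | c :: rest =>
    if PySem.Chars.isalpha c then
      (c :: rest.takeWhile pvCont) :: pvTokens (rest.dropWhile pvCont)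
    else pvTokens rest
termination_by l => l.length
decreasing_by
  · have := List.length_dropWhile_le pvCont rest; simp; omega
  · simp

-- Source B's loop body
def pvCountTok (d : PySem.Dict String Int) (t : List Char) : PySem.Dict String Int :=
  if t.length > 2 then d.insert (String.ofList t) (pvBump d (String.ofList t)) else d

def separaPalavraDicionario_alt (linha : String) (dicionario : List (String × Int)) : List (String × Int) :=
  ((pvTokens linha.toList).foldl pvCountTok (PySem.Dict.mk dicionario)).items

-- ===== PRECONDITION & SPEC =====
def Spec_separaPalavraDicionario (linha : String) (dicionario : List (String × Int)) (out : List (String × Int)) : Prop := out = separaPalavraDicionario_alt linha dicionario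
instance (linha : String) (dicionario : List (String × Int)) (out : List (String × Int)) : Decidable (Spec_separaPalavraDicionario linha dicionario out) := by unfold Spec_separaPalavraDicionario; infer_instance

-- ===== CLAIM (what is proved, stated in full; the proofs are below) =====
def Claim_equal_separaPalavraDicionario : Prop := ∀ (linha : String) (dicionario : List (String × Int)), Dom_separaPalavraDicionario linha dicionario → Spec_separaPalavraDicionario linha dicionario (separaPalavraDicionario linha dicionario)

-- ===== LEMMAS AND PROOFS =====
-- tokens still to come when A's scan sits mid-word with accumulator aux
def pvTokensCont (aux : List Char) (cs : List Char) : List (List Char) :=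
  if aux = [] then pvTokens cs
  else (aux ++ cs.takeWhile pvCont) :: pvTokens (cs.dropWhile pvCont)

theorem pvMain (cs : List Char) : ∀ (aux : List Char) (d : PySem.Dict String Int),
    pvFlushA (cs.foldl pvStepA (aux, d)).1 (cs.foldl pvStepA (aux, d)).2
      = (pvTokensCont aux cs).foldl pvCountTok d := by
  induction cs with
  | nil =>
    intro aux d
    by_cases h : aux = []
    · simp [h, pvTokensCont, pvFlushA, pvTokens]
    · simp [h, pvTokensCont, pvFlushA, pvCountTok, pvTokens]
  | cons c cs ih =>
    intro aux d
    by_cases ha : aux = []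
    · by_cases hc : PySem.Chars.isalpha c
      · simp only [List.foldl_cons, pvStepA, ha, hc]
        simp only [ne_eq, not_true_eq_false, decide_false, Bool.false_and, Bool.or_false, if_true]
        rw [ih]
        simp [pvTokensCont, pvTokens, hc]
      · have hstep : pvStepA ([], d) c = ([], d) := by
          simp [pvStepA, pvFlushA, hc]
        simp only [List.foldl_cons, ha, hstep]
        rw [ih]
        simp [pvTokensCont, pvTokens, hc]
    · by_cases hc : pvCont c
      · have hcond : (PySem.Chars.isalpha c || (decide (aux ≠ []) && decide (c ∈ ['-']))) = true := by
          simp only [pvCont, Bool.or_eq_true, beq_iff_eq] at hc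
          rcases hc with hc | hc <;> simp [hc, ha]
        simp only [List.foldl_cons, pvStepA, hcond, if_true]
        rw [ih]
        have hne : aux ++ [c] ≠ [] := by simp
        simp [pvTokensCont, ha, hne, hc]
      · have hcalpha : PySem.Chars.isalpha c = false := by
          simp only [pvCont, Bool.or_eq_true] at hc; push Not at hc
          simpa using hc.1
        have hcond : (PySem.Chars.isalpha c || (decide (aux ≠ []) && decide (c ∈ ['-']))) = false := by
          simp only [pvCont, Bool.or_eq_true, beq_iff_eq] at hc; push Not at hc
          simp [hcalpha, hc.2]
        simp only [List.foldl_cons, pvStepA, hcond, Bool.false_eq_true, if_false]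
        rw [ih]
        have h1 : pvTokensCont [] cs = pvTokens cs := by simp [pvTokensCont]
        have h2 : pvTokensCont aux (c :: cs)
            = aux :: pvTokens cs := by
          simp [pvTokensCont, ha, hc, pvTokens, hcalpha]
        rw [h1, h2]
        simp only [List.foldl_cons]
        congr 1
        simp [pvFlushA, pvCountTok, ha]

-- ===== VERDICT (by name: the statement is the Claim_ definition above) =====
theorem separaPalavraDicionario_spec : Claim_equal_separaPalavraDicionario := by
  intro linha dicionario _
  show (pvFlushA (linha.toList.foldl pvStepA ([], PySem.Dict.mk dicionario)).1
      (linha.toList.foldl pvStepA ([], PySem.Dict.mk dicionario)).2).items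
    = separaPalavraDicionario_alt linha dicionario
  unfold separaPalavraDicionario_alt
  rw [pvMain]
  simp [pvTokensCont]
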